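-- pv_equiv track=rewrite | github.com/detskinata/skypro_course_3 | funcs.py | sorted_executed
-- ===== SOURCE A (Python) =====
-- def sorted_executed(data_json):
--     sorted_list = []
--     for i in data_json:
--         if i == {}:
--             continue
--         if i['state'] == "EXECUTED":
--             sorted_list.append(i)
--     sorted_list.sort(key=lambda dictionary: dictionary['date'], reverse=True)
--     return sorted_list[:5]
-- ===== SOURCE B (Python) =====
-- def sorted_executed(data_json):
--     # One pass: maintain the top-5 EXECUTED entries in a bounded, descending,
--     # stable insertion buffer instead of filtering, fully sorting and slicing.
--     top = []
--     for i in data_json: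
--         if i == {} or i['state'] != "EXECUTED":
--             continue
--         pos = 0
--         while pos < len(top) and top[pos]['date'] >= i['date']:
--             pos += 1
--         top.insert(pos, i)
--         if len(top) > 5:
--             top.pop()
--     return top
-- ===== Notes on version B (the rewrite author's own statement) =====
-- stated objective: alternative
-- what changed: Instead of collecting all EXECUTED entries, fully sorting them by date descending and slicing [:5], B makes one pass that keeps only a bounded buffer of at most 5 entries, stably inserting each EXECUTED entry by date and dropping the smallest when the buffer overflows (top-k selection, O(1) extra space in the buffer bound).
import Mathlib
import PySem

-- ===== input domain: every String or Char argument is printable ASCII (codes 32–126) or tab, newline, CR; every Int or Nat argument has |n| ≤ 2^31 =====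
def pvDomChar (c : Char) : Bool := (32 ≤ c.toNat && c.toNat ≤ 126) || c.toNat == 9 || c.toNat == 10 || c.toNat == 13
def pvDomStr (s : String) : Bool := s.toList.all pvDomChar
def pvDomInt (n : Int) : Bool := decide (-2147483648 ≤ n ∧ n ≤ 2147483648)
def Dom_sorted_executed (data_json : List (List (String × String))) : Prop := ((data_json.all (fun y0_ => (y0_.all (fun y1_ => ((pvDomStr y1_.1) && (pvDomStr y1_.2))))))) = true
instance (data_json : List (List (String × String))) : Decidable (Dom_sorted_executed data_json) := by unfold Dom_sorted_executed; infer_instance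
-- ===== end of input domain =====

-- B replaces "filter, full stable sort by date descending, slice [:5]" by a single pass
-- keeping a bounded (≤ 5) stable descending insertion buffer (top-k selection): alternative algorithm.

-- ===== PORT A =====
-- i['date'] / i['state'] as total lookups (Pre_ guarantees the key is present where A evaluates it)
def pvKey (i : List (String × String)) : String := PySem.Dict.getD ⟨i⟩ "date" ""
def pvState (i : List (String × String)) : String := PySem.Dict.getD ⟨i⟩ "state" ""

def sorted_executed (data_json : List (List (String × String))) : List (List (String × String)) :=
  let sorted_list := data_json.foldl (fun acc i =>
    if i = [] then acc
    else if pvState i = "EXECUTED" then acc ++ [i] else acc) []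
  PySem.List.slice (PySem.List.sorted sorted_list pvKey true) none (some 5)

-- ===== PORT B =====
-- the while-loop scan "pos += 1 while top[pos]['date'] >= i['date']" followed by insert(pos, i),
-- as the obvious structural recursion over the buffer
def pvInsDesc (x : List (String × String)) : List (List (String × String)) → List (List (String × String))
  | [] => [x]
  | a :: t => if pvKey x ≤ pvKey a then a :: pvInsDesc x t else x :: a :: t

def sorted_executed_alt (data_json : List (List (String × String))) : List (List (String × String)) :=
  data_json.foldl (fun top i =>
    if i = [] then top
    else if pvState i ≠ "EXECUTED" then top
    else
      let t := pvInsDesc i top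
      if 5 < t.length then t.dropLast else t) []

-- ===== PRECONDITION & SPEC =====
-- Pre_ excludes exactly the inputs on which Python A raises KeyError: a non-empty entry
-- without key 'state', or an EXECUTED entry without key 'date'.
def Pre_sorted_executed (data_json : List (List (String × String))) : Prop :=
  (data_json.all (fun i =>
    (i == []) ||
    ((PySem.Dict.contains ⟨i⟩ "state") &&
     (!(PySem.Dict.getD (⟨i⟩ : PySem.Dict String String) "state" "" == "EXECUTED") ||
      PySem.Dict.contains ⟨i⟩ "date")))) = true
instance (data_json : List (List (String × String))) : Decidable (Pre_sorted_executed data_json) := by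
  unfold Pre_sorted_executed; infer_instance

def pvWitness_sorted_executed : (List (List (String × String))) :=
  [[("state", "EXECUTED"), ("date", "2019-07-03")], [], [("state", "CANCELED")],
   [("state", "EXECUTED"), ("date", "2018-01-01")]]

def Spec_sorted_executed (data_json : List (List (String × String))) (out : List (List (String × String))) : Prop := out = sorted_executed_alt data_json
instance (data_json : List (List (String × String))) (out : List (List (String × String))) : Decidable (Spec_sorted_executed data_json out) := by unfold Spec_sorted_executed; infer_instance

-- ===== CLAIM (what is proved, stated in full; the proofs are below) =====
def Claim_equal_sorted_executed : Prop := ∀ (data_json : List (List (String × String))), Dom_sorted_executed data_json → Pre_sorted_executed data_json → Spec_sorted_executed data_json (sorted_executed data_json)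

-- ===== LEMMAS AND PROOFS =====

-- the common filter both loops implement
def pvKeep (i : List (String × String)) : Bool := decide (i ≠ [] ∧ pvState i = "EXECUTED")

lemma pv_foldA (xs : List (List (String × String))) (acc : List (List (String × String))) :
    xs.foldl (fun acc i =>
      if i = [] then acc
      else if pvState i = "EXECUTED" then acc ++ [i] else acc) acc
      = acc ++ xs.filter pvKeep := by
  induction xs generalizing acc with
  | nil => simp
  | cons a t ih =>
    by_cases h1 : a = [] <;> by_cases h2 : pvState a = "EXECUTED" <;>
      simp [h1, h2, ih, pvKeep, List.filter]

-- the step of B's loop body on an EXECUTED entry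
def pvStep5 (top : List (List (String × String))) (i : List (String × String)) :
    List (List (String × String)) :=
  let t := pvInsDesc i top
  if 5 < t.length then t.dropLast else t

lemma pv_foldB (xs : List (List (String × String))) (top : List (List (String × String))) :
    xs.foldl (fun top i =>
      if i = [] then top
      else if pvState i ≠ "EXECUTED" then top
      else if 5 < (pvInsDesc i top).length then (pvInsDesc i top).dropLast
      else pvInsDesc i top) top
      = (xs.filter pvKeep).foldl pvStep5 top := by
  induction xs generalizing top with
  | nil => simp
  | cons a t ih =>
    rw [List.foldl_cons, List.filter_cons]
    by_cases h1 : a = []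
    · have hk : pvKeep a = false := by simp [pvKeep, h1]
      rw [if_pos h1, hk]
      exact ih top
    · rw [if_neg h1]
      by_cases h2 : pvState a = "EXECUTED"
      · have hk : pvKeep a = true := by simp [pvKeep, h1, h2]
        rw [if_neg (by simp [h2] : ¬ pvState a ≠ "EXECUTED"), hk]
        rw [if_pos rfl, List.foldl_cons]
        exact ih _
      · have hk : pvKeep a = false := by simp [pvKeep, h2]
        rw [if_pos h2, hk]
        exact ih top

@[simp] lemma pv_length_insDesc (x : List (String × String)) (l : List (List (String × String))) :
    (pvInsDesc x l).length = l.length + 1 := by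
  induction l with
  | nil => rfl
  | cons a t ih => simp [pvInsDesc]; split <;> simp [ih]

-- truncation commutes with stable descending insertion
lemma pv_insDesc_take (x : List (String × String)) (S : List (List (String × String))) (n : Nat) :
    (pvInsDesc x (S.take n)).take n = (pvInsDesc x S).take n := by
  induction S generalizing n with
  | nil => simp
  | cons a T ih =>
    cases n with
    | zero => simp
    | succ m =>
      simp only [List.take_succ_cons, pvInsDesc]
      split
      · simp [ih]
      · cases m with
        | zero => simp
        | succ k => simp [List.take_take]

lemma pv_step5_take (S : List (List (String × String))) (x : List (String × String)) :
    pvStep5 (S.take 5) x = (pvInsDesc x S).take 5 := by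
  unfold pvStep5
  rcases lt_or_ge 5 (pvInsDesc x (S.take 5)).length with h | h
  · have hlen : (pvInsDesc x (S.take 5)).length = 6 := by
      have := List.length_take_le 5 S
      simp at h ⊢; omega
    simp only [if_pos h]
    rw [List.dropLast_eq_take, hlen]
    simpa using pv_insDesc_take x S 5
  · simp only [if_neg (not_lt.mpr h)]
    rw [← pv_insDesc_take x S 5]
    exact (List.take_of_length_le h).symm

lemma pv_fold_step5 (xs : List (List (String × String))) (S : List (List (String × String))) :
    xs.foldl pvStep5 (S.take 5) = (xs.foldl (fun acc x => pvInsDesc x acc) S).take 5 := by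
  induction xs generalizing S with
  | nil => rfl
  | cons a t ih => simpa [pv_step5_take] using ih (pvInsDesc a S)

-- B's insertion is exactly the stable insertion of Python's reverse=True sort
lemma pv_insDesc_eq_insertBy (x : List (String × String)) (l : List (List (String × String))) :
    pvInsDesc x l = PySem.List.insertBy (fun a b => decide (pvKey b < pvKey a)) x l := by
  induction l with
  | nil => rfl
  | cons a t ih =>
    simp only [pvInsDesc, PySem.List.insertBy]
    rcases le_or_gt (pvKey x) (pvKey a) with h | h
    · simp [h, not_lt.mpr h, ih]
    · simp [h, not_le.mpr h]

-- ===== VERDICT (by name: the statement is the Claim_ definition above) =====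
theorem sorted_executed_spec : Claim_equal_sorted_executed := by
  intro data_json _ _
  unfold Spec_sorted_executed sorted_executed sorted_executed_alt
  simp only []
  rw [pv_foldA, List.nil_append]
  rw [pv_foldB]
  have h5 : (5 : Int) = ((5 : Nat) : Int) := by norm_num
  rw [h5, PySem.List.slice_to_natCast]
  rw [PySem.List.sorted_rev_eq_foldl_insertBy]
  have : (List.filter pvKeep data_json).foldl
      (fun acc x => PySem.List.insertBy (fun a b => decide (pvKey b < pvKey a)) x acc) []
      = (List.filter pvKeep data_json).foldl (fun acc x => pvInsDesc x acc) [] := by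
    apply PySem.List.foldl_congr_mem
    intro acc x _
    exact (pv_insDesc_eq_insertBy x acc).symm
  rw [this, ← pv_fold_step5 _ []]
  rfl
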